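-- pv_equiv track=rewrite | github.com/hudenise2/ONT_Methylation | v1_methylation_per_CpG/count_doublon.py | generate_second_output
-- ===== SOURCE A (Python) =====
-- def generate_second_output(fastq_dic, mod_dic):
--     return_count={x:{} for x in [0,64,128,192]}
--     for seq_name in mod_dic:
--         for dn in mod_dic[seq_name]:
--             for threshold in [0,64,128,192]:
--                 if dn not in return_count[threshold]: return_count[threshold][dn]=[0,0]
--                 count_all= len(fastq_dic[seq_name][dn])
--                 count_mod= len([x for x in mod_dic[seq_name][dn] if int(x[1]) >= threshold])
--                 return_count[threshold][dn]=[return_count[threshold][dn][0]+count_all, return_count[threshold][dn][1]+count_mod]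
--     return return_count
-- ===== SOURCE B (Python) =====
-- def generate_second_output(fastq_dic, mod_dic):
--     # One pass per modification list: tally five bands of int(x[1]) and derive
--     # the four cumulative >=threshold counts, instead of re-filtering the list
--     # once per threshold.
--     acc = {}  # dn -> (count_all, ge0, ge64, ge128, ge192)
--     for seq_name, dns in mod_dic.items():
--         for dn, mods in dns.items():
--             b0 = b1 = b2 = b3 = b4 = 0
--             for x in mods:
--                 v = int(x[1])
--                 if v >= 192:
--                     b4 += 1
--                 elif v >= 128:
--                     b3 += 1
--                 elif v >= 64:
--                     b2 += 1
--                 elif v >= 0: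
--                     b1 += 1
--                 else:
--                     b0 += 1
--             ge192 = b4
--             ge128 = ge192 + b3
--             ge64 = ge128 + b2
--             ge0 = ge64 + b1
--             old = acc.get(dn)
--             if old is None:
--                 old = (0, 0, 0, 0, 0)
--             acc[dn] = (old[0] + len(fastq_dic[seq_name][dn]), old[1] + ge0, old[2] + ge64,
--                        old[3] + ge128, old[4] + ge192)
--     return {t: {dn: [e[0], e[1 + i]] for dn, e in acc.items()}
--             for i, t in enumerate((0, 64, 128, 192))}
-- ===== Notes on version B (the rewrite author's own statement) =====
-- stated objective: alternative
-- what changed: Instead of A's four per-threshold rescans of each modification list (plus repeated dict re-lookup and re-insert of the [count_all,count_mod] pairs across four threshold dicts), B makes a single pass over each list tallying five score bands, derives the four cumulative >=threshold counts from the tally, and accumulates one 5-counter record per dinucleotide, assembling the four threshold dicts once at the end.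
import Mathlib
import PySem

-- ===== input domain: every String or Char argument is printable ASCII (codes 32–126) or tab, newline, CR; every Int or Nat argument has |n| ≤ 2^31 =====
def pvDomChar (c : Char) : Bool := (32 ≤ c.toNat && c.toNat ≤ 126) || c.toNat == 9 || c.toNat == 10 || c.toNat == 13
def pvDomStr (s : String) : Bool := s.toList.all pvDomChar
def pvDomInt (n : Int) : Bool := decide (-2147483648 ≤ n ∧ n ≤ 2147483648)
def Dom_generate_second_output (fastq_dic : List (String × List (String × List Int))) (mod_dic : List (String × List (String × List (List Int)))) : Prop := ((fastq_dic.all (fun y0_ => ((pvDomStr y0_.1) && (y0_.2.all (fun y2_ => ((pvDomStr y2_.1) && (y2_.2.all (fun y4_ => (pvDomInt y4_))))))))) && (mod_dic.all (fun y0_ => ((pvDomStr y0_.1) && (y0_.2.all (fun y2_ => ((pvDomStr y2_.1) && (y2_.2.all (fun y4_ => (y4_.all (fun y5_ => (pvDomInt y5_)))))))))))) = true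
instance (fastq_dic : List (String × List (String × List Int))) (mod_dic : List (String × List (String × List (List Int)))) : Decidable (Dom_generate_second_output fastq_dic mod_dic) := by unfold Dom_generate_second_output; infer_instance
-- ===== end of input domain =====

-- B replaces A's four filter rescans of each modification list by a single
-- banded tally per list (objective: alternative decomposition; same asymptotic cost,
-- one pass instead of four per list).

-- ===== PORT A =====

-- int(x[1]) (the admitted inputs have x.length ≥ 2, see Pre_)
def pyV (x : List Int) : Int := (PySem.List.pyGet? x 1).getD 0

-- body of A's `for threshold in [0,64,128,192]` loop (one (dn, mods) pair p)
def gsoStepA (fastq_dic : List (String × List (String × List Int))) (seq_name : String)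
    (rc : PySem.Dict Int (PySem.Dict String (List Int))) (p : String × List (List Int)) :
    PySem.Dict Int (PySem.Dict String (List Int)) :=
  ([0, 64, 128, 192] : List Int).foldl (fun rc threshold =>
    let inner := rc.getD threshold PySem.Dict.empty
    let inner := if inner.contains p.1 then inner else inner.insert p.1 [0, 0]
    let count_all : Int := ((PySem.Dict.ofList ((PySem.Dict.ofList fastq_dic).getD seq_name [])).getD p.1 []).length
    let count_mod : Int := ((p.2.filter (fun x => decide (threshold ≤ pyV x))).length : Int)
    let cur := inner.getD p.1 [0, 0]
    rc.insert threshold (inner.insert p.1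
      [(PySem.List.pyGet? cur 0).getD 0 + count_all, (PySem.List.pyGet? cur 1).getD 0 + count_mod])) rc

def generate_second_output (fastq_dic : List (String × List (String × List Int))) (mod_dic : List (String × List (String × List (List Int)))) : List (Int × List (String × List Int)) :=
  let rc0 : PySem.Dict Int (PySem.Dict String (List Int)) :=
    PySem.Dict.ofList [(0, PySem.Dict.empty), (64, PySem.Dict.empty), (128, PySem.Dict.empty), (192, PySem.Dict.empty)]
  let rc := mod_dic.foldl (fun rc sp => sp.2.foldl (gsoStepA fastq_dic sp.1) rc) rc0
  rc.items.map (fun q => (q.1, q.2.items))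

-- ===== PORT B =====

-- B's inner tally loop: how many int(x[1]) fall in (-inf,0), [0,64), [64,128), [128,192), [192,inf)
def gsoBands (mods : List (List Int)) : Int × Int × Int × Int × Int :=
  mods.foldl (fun b x =>
    let v := pyV x
    if 192 ≤ v then (b.1, b.2.1, b.2.2.1, b.2.2.2.1, b.2.2.2.2 + 1)
    else if 128 ≤ v then (b.1, b.2.1, b.2.2.1, b.2.2.2.1 + 1, b.2.2.2.2)
    else if 64 ≤ v then (b.1, b.2.1, b.2.2.1 + 1, b.2.2.2.1, b.2.2.2.2)
    else if 0 ≤ v then (b.1, b.2.1 + 1, b.2.2.1, b.2.2.2.1, b.2.2.2.2)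
    else (b.1 + 1, b.2.1, b.2.2.1, b.2.2.2.1, b.2.2.2.2)) (0, 0, 0, 0, 0)

-- body of B's `for dn, mods in dns.items()` loop
def gsoStepB (fastq_dic : List (String × List (String × List Int))) (seq_name : String)
    (acc : PySem.Dict String (Int × Int × Int × Int × Int)) (p : String × List (List Int)) :
    PySem.Dict String (Int × Int × Int × Int × Int) :=
  let fa := PySem.Dict.ofList ((PySem.Dict.ofList fastq_dic).getD seq_name [])
  let b := gsoBands p.2
  let ge192 := b.2.2.2.2
  let ge128 := ge192 + b.2.2.2.1
  let ge64 := ge128 + b.2.2.1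
  let ge0 := ge64 + b.2.1
  let old := (acc.get? p.1).getD (0, 0, 0, 0, 0)
  acc.insert p.1 (old.1 + ((fa.getD p.1 []).length : Int), old.2.1 + ge0, old.2.2.1 + ge64,
    old.2.2.2.1 + ge128, old.2.2.2.2 + ge192)

def generate_second_output_alt (fastq_dic : List (String × List (String × List Int))) (mod_dic : List (String × List (String × List (List Int)))) : List (Int × List (String × List Int)) :=
  let acc := mod_dic.foldl (fun acc sp => sp.2.foldl (gsoStepB fastq_dic sp.1) acc)
    (PySem.Dict.empty : PySem.Dict String (Int × Int × Int × Int × Int))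
  [(0, acc.items.map (fun q => (q.1, [q.2.1, q.2.2.1]))),
   (64, acc.items.map (fun q => (q.1, [q.2.1, q.2.2.2.1]))),
   (128, acc.items.map (fun q => (q.1, [q.2.1, q.2.2.2.2.1]))),
   (192, acc.items.map (fun q => (q.1, [q.2.1, q.2.2.2.2.2])))]

-- ===== PRECONDITION & SPEC =====
-- Pre_ excludes (a) inputs where the Python raises: a seq_name or dn of mod_dic missing
-- from fastq_dic (KeyError) or a modification record shorter than 2 (IndexError on x[1]);
-- and (b) association lists with duplicate keys, which a Python dict collapses silently
-- (its last-value overwrite order is accidental at the list level).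
def Pre_generate_second_output (fastq_dic : List (String × List (String × List Int))) (mod_dic : List (String × List (String × List (List Int)))) : Prop :=
  (fastq_dic.map Prod.fst).Nodup ∧ (∀ q ∈ fastq_dic, (q.2.map Prod.fst).Nodup) ∧
  (mod_dic.map Prod.fst).Nodup ∧ (∀ sp ∈ mod_dic, (sp.2.map Prod.fst).Nodup) ∧
  (∀ sp ∈ mod_dic, ∀ p ∈ sp.2,
    (∃ q ∈ fastq_dic, q.1 = sp.1 ∧ ∃ r ∈ q.2, r.1 = p.1) ∧ ∀ x ∈ p.2, 2 ≤ x.length)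

instance (fastq_dic : List (String × List (String × List Int))) (mod_dic : List (String × List (String × List (List Int)))) : Decidable (Pre_generate_second_output fastq_dic mod_dic) := by unfold Pre_generate_second_output; infer_instance

def pvWitness_generate_second_output : (List (String × List (String × List Int))) × (List (String × List (String × List (List Int)))) :=
  ([("s", [("CG", [1, 2])])], [("s", [("CG", [[0, 200], [1, 50]])])])

def Spec_generate_second_output (fastq_dic : List (String × List (String × List Int))) (mod_dic : List (String × List (String × List (List Int)))) (out : List (Int × List (String × List Int))) : Prop := out = generate_second_output_alt fastq_dic mod_dic
instance (fastq_dic : List (String × List (String × List Int))) (mod_dic : List (String × List (String × List (List Int)))) (out : List (Int × List (String × List Int))) : Decidable (Spec_generate_second_output fastq_dic mod_dic out) := by unfold Spec_generate_second_output; infer_instance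

-- ===== CLAIM (what is proved, stated in full; the proofs are below) =====
def Claim_equal_generate_second_output : Prop := ∀ (fastq_dic : List (String × List (String × List Int))) (mod_dic : List (String × List (String × List (List Int)))), Dom_generate_second_output fastq_dic mod_dic → Pre_generate_second_output fastq_dic mod_dic → Spec_generate_second_output fastq_dic mod_dic (generate_second_output fastq_dic mod_dic)

-- ===== LEMMAS AND PROOFS =====

-- selector for threshold band j (1..4) of B's accumulator entry
def pvSel (j : Nat) (e : Int × Int × Int × Int × Int) : Int :=
  if j = 1 then e.2.1 else if j = 2 then e.2.2.1 else if j = 3 then e.2.2.2.1 else e.2.2.2.2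

-- the value-map applied to B's accumulator entries to obtain A's per-threshold dict entry
def pvProj (j : Nat) (e : Int × Int × Int × Int × Int) : List Int := [e.1, pvSel j e]

-- A's per-threshold dict as a view of B's accumulator
def pvView (j : Nat) (acc : PySem.Dict String (Int × Int × Int × Int × Int)) : PySem.Dict String (List Int) :=
  PySem.Dict.mk (acc.items.map (fun q => (q.1, pvProj j q.2)))

def pvRcOf (acc : PySem.Dict String (Int × Int × Int × Int × Int)) : PySem.Dict Int (PySem.Dict String (List Int)) :=
  PySem.Dict.mk [(0, pvView 1 acc), (64, pvView 2 acc), (128, pvView 3 acc), (192, pvView 4 acc)]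

-- A's per-threshold update of one inner dict (the reduced body of gsoStepA's loop)
def pvUpdA (fastq_dic : List (String × List (String × List Int))) (seq_name : String)
    (p : String × List (List Int)) (threshold : Int) (d : PySem.Dict String (List Int)) :
    PySem.Dict String (List Int) :=
  let inner := if d.contains p.1 then d else d.insert p.1 [0, 0]
  let count_all : Int := ((PySem.Dict.ofList ((PySem.Dict.ofList fastq_dic).getD seq_name [])).getD p.1 []).length
  let count_mod : Int := ((p.2.filter (fun x => decide (threshold ≤ pyV x))).length : Int)
  let cur := inner.getD p.1 [0, 0]
  inner.insert p.1 [(PySem.List.pyGet? cur 0).getD 0 + count_all, (PySem.List.pyGet? cur 1).getD 0 + count_mod]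

theorem pv_stepA_eval (fq : List (String × List (String × List Int))) (seq : String)
    (p : String × List (List Int)) (d0 d1 d2 d3 : PySem.Dict String (List Int)) :
    gsoStepA fq seq (PySem.Dict.mk [(0, d0), (64, d1), (128, d2), (192, d3)]) p
      = PySem.Dict.mk [(0, pvUpdA fq seq p 0 d0), (64, pvUpdA fq seq p 64 d1),
          (128, pvUpdA fq seq p 128 d2), (192, pvUpdA fq seq p 192 d3)] := by
  rfl

theorem pv_map_get? (l : List (String × (Int × Int × Int × Int × Int))) (j : Nat) (k : String) :
    (PySem.Dict.mk (l.map (fun q => (q.1, pvProj j q.2)))).get? k = ((PySem.Dict.mk l).get? k).map (pvProj j) := by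
  induction l with
  | nil => simp [PySem.Dict.get?]
  | cons a l ih =>
    rw [List.map_cons]
    show (PySem.Dict.mk ((a.1, pvProj j a.2) :: _)).get? k = _
    rw [PySem.Dict.get?_mk_cons]
    conv_rhs => rw [show (a :: l) = ((a.1, a.2) :: l) from rfl, PySem.Dict.get?_mk_cons]
    rw [apply_ite (Option.map (pvProj j))]
    split <;> simp [ih]

theorem pv_map_contains (l : List (String × (Int × Int × Int × Int × Int))) (j : Nat) (k : String) :
    (PySem.Dict.mk (l.map (fun q => (q.1, pvProj j q.2)))).contains k = (PySem.Dict.mk l).contains k := by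
  rw [PySem.Dict.contains_eq_isSome_get?, PySem.Dict.contains_eq_isSome_get?, pv_map_get?]
  cases (PySem.Dict.mk l).get? k <;> rfl

theorem pv_view_insert (acc : PySem.Dict String (Int × Int × Int × Int × Int)) (j : Nat) (k : String)
    (v : Int × Int × Int × Int × Int) :
    pvView j (acc.insert k v) = (pvView j acc).insert k (pvProj j v) := by
  show PySem.Dict.mk ((acc.insert k v).items.map (fun q => (q.1, pvProj j q.2))) = _
  apply PySem.Dict.ext
  have hc : (PySem.Dict.mk (acc.items.map (fun q => (q.1, pvProj j q.2)))).contains k = acc.contains k :=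
    pv_map_contains acc.items j k
  by_cases h : acc.contains k = true
  · rw [PySem.Dict.items_insert_of_contains _ _ h,
      PySem.Dict.items_insert_of_contains _ _ (show (pvView j acc).contains k = true by rw [pvView, hc]; exact h)]
    show List.map _ (List.map _ _) = _
    simp only [List.map_map, pvView]
    apply List.map_congr_left
    rintro ⟨a, b⟩ hm
    by_cases hk : a = k <;> simp [hk]
  · rw [PySem.Dict.items_insert_of_not_contains _ _ (by simpa using h),
      PySem.Dict.items_insert_of_not_contains _ _
        (show (pvView j acc).contains k = false by rw [pvView]; rw [hc]; simpa using h)]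
    simp [pvView]

-- the step function of gsoBands, named for the proofs
def pvBStep (b : Int × Int × Int × Int × Int) (x : List Int) : Int × Int × Int × Int × Int :=
  let v := pyV x
  if 192 ≤ v then (b.1, b.2.1, b.2.2.1, b.2.2.2.1, b.2.2.2.2 + 1)
  else if 128 ≤ v then (b.1, b.2.1, b.2.2.1, b.2.2.2.1 + 1, b.2.2.2.2)
  else if 64 ≤ v then (b.1, b.2.1, b.2.2.1 + 1, b.2.2.2.1, b.2.2.2.2)
  else if 0 ≤ v then (b.1, b.2.1 + 1, b.2.2.1, b.2.2.2.1, b.2.2.2.2)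
  else (b.1 + 1, b.2.1, b.2.2.1, b.2.2.2.1, b.2.2.2.2)

theorem pv_gsoBands_eq (mods : List (List Int)) : gsoBands mods = mods.foldl pvBStep (0, 0, 0, 0, 0) := rfl

theorem pv_bands_shift (mods : List (List Int)) :
    ∀ a, mods.foldl pvBStep a
      = (a.1 + (gsoBands mods).1, a.2.1 + (gsoBands mods).2.1, a.2.2.1 + (gsoBands mods).2.2.1,
         a.2.2.2.1 + (gsoBands mods).2.2.2.1, a.2.2.2.2 + (gsoBands mods).2.2.2.2) := by
  induction mods with
  | nil => intro a; simp [gsoBands]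
  | cons x xs ih =>
    intro a
    rw [pv_gsoBands_eq]
    simp only [List.foldl_cons]
    rw [ih, ih]
    simp only [pvBStep]
    split_ifs <;> simp [Prod.ext_iff] <;> omega

theorem pv_bands_spec (mods : List (List Int)) :
    (((mods.filter (fun x => decide ((0:Int) ≤ pyV x))).length : Int)
        = (((gsoBands mods).2.2.2.2 + (gsoBands mods).2.2.2.1) + (gsoBands mods).2.2.1) + (gsoBands mods).2.1)
    ∧ (((mods.filter (fun x => decide ((64:Int) ≤ pyV x))).length : Int)
        = ((gsoBands mods).2.2.2.2 + (gsoBands mods).2.2.2.1) + (gsoBands mods).2.2.1)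
    ∧ (((mods.filter (fun x => decide ((128:Int) ≤ pyV x))).length : Int)
        = (gsoBands mods).2.2.2.2 + (gsoBands mods).2.2.2.1)
    ∧ (((mods.filter (fun x => decide ((192:Int) ≤ pyV x))).length : Int)
        = (gsoBands mods).2.2.2.2) := by
  induction mods with
  | nil => simp [gsoBands]
  | cons x xs ih =>
    obtain ⟨i0, i1, i2, i3⟩ := ih
    rw [pv_gsoBands_eq]
    simp only [List.foldl_cons]
    rw [pv_bands_shift xs]
    simp only [pvBStep, List.filter_cons]
    by_cases h192 : (192:Int) ≤ pyV x
    · simp [h192, show (0:Int) ≤ pyV x by omega, show (64:Int) ≤ pyV x by omega,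
        show (128:Int) ≤ pyV x by omega]
      refine ⟨by omega, by omega, by omega, by omega⟩
    · by_cases h128 : (128:Int) ≤ pyV x
      · simp [h192, h128, show (0:Int) ≤ pyV x by omega, show (64:Int) ≤ pyV x by omega]
        refine ⟨by omega, by omega, by omega, by omega⟩
      · by_cases h64 : (64:Int) ≤ pyV x
        · simp [h192, h128, h64, show (0:Int) ≤ pyV x by omega]
          refine ⟨by omega, by omega, by omega, by omega⟩
        · by_cases h0 : (0:Int) ≤ pyV x
          · simp [h192, h128, h64, h0]
            refine ⟨by omega, by omega, by omega, by omega⟩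
          · simp [h192, h128, h64, h0]
            refine ⟨by omega, by omega, by omega, by omega⟩

theorem pv_stepAB (fq : List (String × List (String × List Int))) (seq : String)
    (acc : PySem.Dict String (Int × Int × Int × Int × Int)) (p : String × List (List Int)) :
    gsoStepA fq seq (pvRcOf acc) p = pvRcOf (gsoStepB fq seq acc p) := by
  obtain ⟨hb0, hb1, hb2, hb3⟩ := pv_bands_spec p.2
  rw [pvRcOf, pv_stepA_eval]
  rw [show pvRcOf (gsoStepB fq seq acc p) = PySem.Dict.mk
    [(0, pvView 1 (gsoStepB fq seq acc p)), (64, pvView 2 (gsoStepB fq seq acc p)),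
     (128, pvView 3 (gsoStepB fq seq acc p)), (192, pvView 4 (gsoStepB fq seq acc p))] from rfl]
  refine congrArg PySem.Dict.mk ?_
  simp only [List.cons.injEq, Prod.mk.injEq, true_and, and_true]
  refine ⟨?_, ?_, ?_, ?_⟩ <;>
  · simp only [pvUpdA, gsoStepB]
    by_cases h : acc.contains p.1 = true
    · have hcv : ∀ j, (pvView j acc).contains p.1 = true := by
        intro j
        rw [show pvView j acc = PySem.Dict.mk (acc.items.map (fun q => (q.1, pvProj j q.2))) from rfl,
          pv_map_contains]
        exact h
      obtain ⟨e, he⟩ := Option.isSome_iff_exists.mp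
        (show (acc.get? p.1).isSome = true by rw [← PySem.Dict.contains_eq_isSome_get?]; exact h)
      have hv : ∀ j, (pvView j acc).getD p.1 [0, 0] = pvProj j e := by
        intro j
        rw [show pvView j acc = PySem.Dict.mk (acc.items.map (fun q => (q.1, pvProj j q.2))) from rfl,
          PySem.Dict.getD_eq_get?_getD, pv_map_get?, he]
        rfl
      rw [if_pos (hcv _), hv, he, pv_view_insert]
      congr 1
      simp [pvProj, pvSel, PySem.List.pyGet?, PySem.List.pyIdx?]
      omega
    · have h' : acc.contains p.1 = false := by simpa using h
      have hcv : ∀ j, (pvView j acc).contains p.1 = false := by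
        intro j
        rw [show pvView j acc = PySem.Dict.mk (acc.items.map (fun q => (q.1, pvProj j q.2))) from rfl,
          pv_map_contains]
        exact h'
      have hn : acc.get? p.1 = none := by
        have := PySem.Dict.contains_eq_isSome_get? (d := acc) (k := p.1)
        rw [h'] at this
        cases hg : acc.get? p.1 with
        | none => rfl
        | some e => rw [hg] at this; simp at this
      rw [if_neg (by simp [hcv 1, hcv 2, hcv 3, hcv 4]), hn, PySem.Dict.getD_insert_self,
        PySem.Dict.insert_insert_self, pv_view_insert]
      congr 1
      simp [pvProj, pvSel, PySem.List.pyGet?, PySem.List.pyIdx?]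
      omega

theorem pv_fold_inner (fq : List (String × List (String × List Int))) (seq : String)
    (dns : List (String × List (List Int))) (acc : PySem.Dict String (Int × Int × Int × Int × Int)) :
    dns.foldl (gsoStepA fq seq) (pvRcOf acc) = pvRcOf (dns.foldl (gsoStepB fq seq) acc) := by
  induction dns generalizing acc with
  | nil => rfl
  | cons p dns ih => simp only [List.foldl_cons, pv_stepAB, ih]

theorem pv_fold_outer (fq : List (String × List (String × List Int)))
    (md : List (String × List (String × List (List Int)))) (acc : PySem.Dict String (Int × Int × Int × Int × Int)) :
    md.foldl (fun rc sp => sp.2.foldl (gsoStepA fq sp.1) rc) (pvRcOf acc)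
      = pvRcOf (md.foldl (fun acc sp => sp.2.foldl (gsoStepB fq sp.1) acc) acc) := by
  induction md generalizing acc with
  | nil => rfl
  | cons sp md ih => simp only [List.foldl_cons, pv_fold_inner, ih]

-- ===== VERDICT (by name: the statement is the Claim_ definition above) =====
theorem generate_second_output_spec : Claim_equal_generate_second_output := by
  intro fq md _ _
  unfold Spec_generate_second_output
  simp only [generate_second_output, generate_second_output_alt]
  have h0 : (PySem.Dict.ofList [((0:Int), (PySem.Dict.empty : PySem.Dict String (List Int))), (64, PySem.Dict.empty), (128, PySem.Dict.empty), (192, PySem.Dict.empty)]) = pvRcOf PySem.Dict.empty := by rfl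
  rw [h0, pv_fold_outer]
  rfl
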